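-- pv_equiv track=rewrite | github.com/divya-chopra/automaticDocumentationCreatorBedrockAgents | code/agents/action_groups/GetInfrastructureDetails/lambda_GetInfrastructureDetails.py | format_infrastructure_details
-- ===== SOURCE A (Python) =====
-- def format_infrastructure_details(raw_details: str) -> str:
--     """
--     Format the raw infrastructure details into readable HTML
--     """
--     # Split the details into sections
--     lines = raw_details.split()
--     formatted_html = ""
--
--     # Track current section
--     current_section = ""
--
--     for line in lines:
--         if line.endswith(':'):
--             # New section
--             if current_section:
--                 formatted_html += "</div>\n"
--             current_section = line[:-1]
--             formatted_html += f'<div class="section"><h4>{current_section}</h4>\n'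
--             continue
--
--         # Add the line content
--         if ':' in line:
--             key, value = line.split(':', 1)
--             formatted_html += f'<div class="item"><span class="label">{key}:</span><span class="value">{value}</span></div>\n'
--         else:
--             formatted_html += f'<div class="item">{line}</div>\n'
--
--     if current_section:
--         formatted_html += "</div>\n"
--
--     return formatted_html
-- ===== SOURCE B (Python) =====
-- def _split_at_headers(tokens):
--     """Split tokens into (prefix of non-header tokens, remainder starting at first header)."""
--     for i, t in enumerate(tokens):
--         if t.endswith(':'):
--             return tokens[:i], tokens[i:]
--     return tokens, []
--
--
-- def _render_item(token):
--     if ':' in token: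
--         key, value = token.split(':', 1)
--         return f'<div class="item"><span class="label">{key}:</span><span class="value">{value}</span></div>\n'
--     return f'<div class="item">{token}</div>\n'
--
--
-- def format_infrastructure_details(raw_details: str) -> str:
--     tokens = raw_details.split()
--     leading, rest = _split_at_headers(tokens)
--     html = ''.join(_render_item(t) for t in leading)
--     while rest:
--         header, rest = rest[0][:-1], rest[1:]
--         items, rest = _split_at_headers(rest)
--         html += f'<div class="section"><h4>{header}</h4>\n'
--         html += ''.join(_render_item(t) for t in items)
--         html += '</div>\n'
--     return html
-- ===== Notes on version B (the rewrite author's own statement) =====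
-- stated objective: alternative
-- what changed: Replaced A's single pass with a running current-section string by a span-based two-pass decomposition: leading non-header tokens are rendered first, then a loop repeatedly takes a header and the span of its item tokens and emits the whole section including its closing </div>.
-- intended difference: On inputs whose whitespace-split tokens contain a bare ':' , A opens a <div class="section"> that it never closes (unbalanced HTML, an artefact of its falsy-string section test), while B closes every section div; B's balanced output is the intended value. — e.g. on format_infrastructure_details("a :"): A returns "<div class=\"item\">a</div>\n<div class=\"section\"><h4></h4>\n", B returns "<div class=\"item\">a</div>\n<div class=\"section\"><h4></h4>\n</div>\n"
import Mathlib
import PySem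

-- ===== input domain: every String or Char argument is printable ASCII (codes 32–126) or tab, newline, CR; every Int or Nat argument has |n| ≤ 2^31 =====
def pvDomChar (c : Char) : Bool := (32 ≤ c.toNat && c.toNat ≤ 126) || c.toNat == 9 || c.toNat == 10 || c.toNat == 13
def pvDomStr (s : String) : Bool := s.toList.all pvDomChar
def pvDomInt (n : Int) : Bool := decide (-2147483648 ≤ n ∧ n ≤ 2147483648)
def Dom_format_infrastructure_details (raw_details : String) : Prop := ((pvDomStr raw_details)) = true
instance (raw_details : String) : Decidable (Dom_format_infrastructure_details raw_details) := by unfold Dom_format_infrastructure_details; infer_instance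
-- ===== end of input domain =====

-- B re-implements the single-pass stateful formatter as a span-based two-pass decomposition
-- (leading items, then header/items/close groups); objective: alternative decomposition, same
-- cost. On inputs whose token list contains a bare ':' A leaves a section div unclosed while B
-- closes every section (see D_ below); elsewhere the outputs are proved equal.


-- ===== PORT A =====
def format_infrastructure_details (raw_details : String) : String :=
  let lines := PySem.Str.split₀ raw_details
  let st := lines.foldl (fun (s : String × String) line =>
    if PySem.Str.endswith line ":" then
      let s1 := if s.2 ≠ "" then s.1 ++ "</div>\n" else s.1
      let cur := PySem.Str.slice line none (some (-1))
      (s1 ++ "<div class=\"section\"><h4>" ++ cur ++ "</h4>\n", cur)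
    else if PySem.Str.isIn ":" line then
      -- line.split(':', 1): with ':' in line this yields exactly [key, value]
      match PySem.Str.splitMax? line ":" 1 with
      | some (key :: value :: _) =>
        (s.1 ++ "<div class=\"item\"><span class=\"label\">" ++ key ++ ":</span><span class=\"value\">" ++ value ++ "</span></div>\n", s.2)
      | _ => s  -- unreachable
    else
      (s.1 ++ "<div class=\"item\">" ++ line ++ "</div>\n", s.2)) ("", "")
  if st.2 ≠ "" then st.1 ++ "</div>\n" else st.1

-- ===== PORT B =====
-- B-side helpers (transliteration of Source B)
def pvIsHeader (t : String) : Bool := PySem.Str.endswith t ":"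

def pvRenderItem (t : String) : String :=
  if PySem.Str.isIn ":" t then
    match PySem.Str.splitMax? t ":" 1 with
    | some (key :: value :: _) =>
      "<div class=\"item\"><span class=\"label\">" ++ key ++ ":</span><span class=\"value\">" ++ value ++ "</span></div>\n"
    | some [_] => ""
    | some [] => ""
    | none => ""  -- unreachable: ':' in t
  else "<div class=\"item\">" ++ t ++ "</div>\n"

-- the `while rest:` loop of Source B: header, its span of items, close, recurse
def pvRenderSections : List String → String
  | [] => ""
  | t :: rest =>
    let header := PySem.Str.slice t none (some (-1))
    let items := rest.takeWhile (fun x => ¬ pvIsHeader x)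
    let rest' := rest.dropWhile (fun x => ¬ pvIsHeader x)
    "<div class=\"section\"><h4>" ++ header ++ "</h4>\n" ++
      String.join (items.map pvRenderItem) ++
      "</div>\n" ++
      pvRenderSections rest'
termination_by ts => ts.length
decreasing_by
  exact Nat.lt_succ_of_le (List.length_dropWhile_le _ _)

def format_infrastructure_details_alt (raw_details : String) : String :=
  let tokens := PySem.Str.split₀ raw_details
  let leading := tokens.takeWhile (fun x => ¬ pvIsHeader x)
  let rest := tokens.dropWhile (fun x => ¬ pvIsHeader x)
  String.join (leading.map pvRenderItem) ++ pvRenderSections rest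

-- ===== PRECONDITION & SPEC =====
-- On inputs whose whitespace-split tokens contain a bare ':' , A opens a <div class="section">
-- it never closes (its falsy-string section test skips the close), while B closes every
-- section div; B's balanced HTML is the intended value.
def D_format_infrastructure_details (raw_details : String) : Prop :=
  ":" ∈ PySem.Str.split₀ raw_details
instance (raw_details : String) : Decidable (D_format_infrastructure_details raw_details) := by unfold D_format_infrastructure_details; infer_instance

def Spec_format_infrastructure_details (raw_details : String) (out : String) : Prop := ¬ D_format_infrastructure_details raw_details → out = format_infrastructure_details_alt raw_details
instance (raw_details : String) (out : String) : Decidable (Spec_format_infrastructure_details raw_details out) := by unfold Spec_format_infrastructure_details; infer_instance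

def pvDiffWitness_format_infrastructure_details : String := "a :"
def pvDiffWitnessOut_format_infrastructure_details : String × String :=
  ("<div class=\"item\">a</div>\n<div class=\"section\"><h4></h4>\n",
   "<div class=\"item\">a</div>\n<div class=\"section\"><h4></h4>\n</div>\n")

-- ===== CLAIM (what is proved, stated in full; the proofs are below) =====
def Claim_unchanged_format_infrastructure_details : Prop := ∀ (raw_details : String), Dom_format_infrastructure_details raw_details → Spec_format_infrastructure_details raw_details (format_infrastructure_details raw_details)
def Claim_changed_format_infrastructure_details : Prop := Dom_format_infrastructure_details (pvDiffWitness_format_infrastructure_details) ∧ D_format_infrastructure_details (pvDiffWitness_format_infrastructure_details) ∧ format_infrastructure_details (pvDiffWitness_format_infrastructure_details) = pvDiffWitnessOut_format_infrastructure_details.1 ∧ format_infrastructure_details_alt (pvDiffWitness_format_infrastructure_details) = pvDiffWitnessOut_format_infrastructure_details.2 ∧ pvDiffWitnessOut_format_infrastructure_details.1 ≠ pvDiffWitnessOut_format_infrastructure_details.2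
def Claim_exact_format_infrastructure_details : Prop := ∀ (raw_details : String), Dom_format_infrastructure_details raw_details → D_format_infrastructure_details raw_details → format_infrastructure_details raw_details ≠ format_infrastructure_details_alt raw_details

-- ===== LEMMAS AND PROOFS =====

-- A's remaining output given the current section name and the remaining tokens
def pvGRest : String → List String → String
  | cs, [] => if cs ≠ "" then "</div>\n" else ""
  | cs, t :: ts =>
    if pvIsHeader t then
      let cur := PySem.Str.slice t none (some (-1))
      (if cs ≠ "" then "</div>\n" else "") ++ "<div class=\"section\"><h4>" ++ cur ++ "</h4>\n" ++ pvGRest cur ts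
    else pvRenderItem t ++ pvGRest cs ts

theorem pvFoldlApp (l : List String) : ∀ a, l.foldl (fun r s => r ++ s) a = a ++ l.foldl (fun r s => r ++ s) "" := by
  induction l with
  | nil => intro a; simp [String.append_empty]
  | cons b l ih => intro a; simp only [List.foldl_cons]; rw [ih, ih ("" ++ b), String.empty_append, String.append_assoc]

theorem pvJoinCons (a : String) (l : List String) : String.join (a :: l) = a ++ String.join l := by
  simp only [String.join, List.foldl_cons, String.empty_append]; exact pvFoldlApp l a

theorem pvFoldA (ts : List String) : ∀ (acc cs : String),
    (let st := ts.foldl (fun (s : String × String) line =>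
      if PySem.Str.endswith line ":" then
        let s1 := if s.2 ≠ "" then s.1 ++ "</div>\n" else s.1
        let cur := PySem.Str.slice line none (some (-1))
        (s1 ++ "<div class=\"section\"><h4>" ++ cur ++ "</h4>\n", cur)
      else if PySem.Str.isIn ":" line then
        match PySem.Str.splitMax? line ":" 1 with
        | some (key :: value :: _) =>
          (s.1 ++ "<div class=\"item\"><span class=\"label\">" ++ key ++ ":</span><span class=\"value\">" ++ value ++ "</span></div>\n", s.2)
        | _ => s
      else
        (s.1 ++ "<div class=\"item\">" ++ line ++ "</div>\n", s.2)) (acc, cs)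
    if st.2 ≠ "" then st.1 ++ "</div>\n" else st.1) = acc ++ pvGRest cs ts := by
  induction ts with
  | nil =>
    intro acc cs
    simp only [List.foldl_nil, pvGRest]
    split_ifs <;> simp [String.append_empty]
  | cons t ts ih =>
    intro acc cs
    simp only [List.foldl_cons, pvGRest, pvIsHeader]
    by_cases h : PySem.Str.endswith t ":"
    · simp only [h, if_pos]
      rw [ih]
      split_ifs with hcs <;> simp [String.append_assoc]
    · simp only [h, Bool.false_eq_true, not_false_iff, if_neg]
      by_cases h2 : PySem.Str.isIn ":" t
      · simp only [h2, if_true]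
        cases hsp : PySem.Str.splitMax? t ":" 1 with
        | none =>
          rw [ih]
          have hr : pvRenderItem t = "" := by simp only [pvRenderItem, h2, if_true]; rw [hsp]
          simp [hr, String.empty_append]
        | some parts =>
          match parts with
          | [] =>
            rw [ih]
            have hr : pvRenderItem t = "" := by simp only [pvRenderItem, h2, if_true]; rw [hsp]
            simp [hr, String.empty_append]
          | [k] =>
            rw [ih]
            have hr : pvRenderItem t = "" := by simp only [pvRenderItem, h2, if_true]; rw [hsp]
            simp [hr, String.empty_append]
          | k :: v :: rest =>
            rw [ih]
            have hr : pvRenderItem t = "<div class=\"item\"><span class=\"label\">" ++ k ++ ":</span><span class=\"value\">" ++ v ++ "</span></div>\n" := by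
              simp only [pvRenderItem, h2, if_true]; rw [hsp]
            simp [hr, String.append_assoc]
      · simp only [h2]
        rw [ih]
        have hr : pvRenderItem t = "<div class=\"item\">" ++ t ++ "</div>\n" := by
          simp only [pvRenderItem]; rw [if_neg h2]
        simp [hr, String.append_assoc]

-- a header token other than ":" has a nonempty section name
theorem pvHeaderName_ne (t : String) (h : pvIsHeader t = true) (hne : t ≠ ":") :
    PySem.Str.slice t none (some (-1)) ≠ "" := by
  intro hcontra
  have hl : (PySem.Str.slice t none (some (-1))).toList = t.toList.dropLast := PySem.Str.slice_to_neg_one t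
  rw [hcontra] at hl
  have hsuf : ":".toList <:+ t.toList := by
    have := (PySem.Chars.endswith_iff (s := t.toList) (p := ":".toList)).mp (by simpa using h)
    exact this
  obtain ⟨pre, hpre⟩ := hsuf
  apply hne
  have hdrop : t.toList.dropLast = [] := hl.symm
  have htl : t.toList = [':'] := by
    rcases List.eq_nil_or_concat t.toList with hnil | ⟨l, c, hc⟩
    · rw [hnil] at hpre; simp at hpre
    · have hl0 : l = [] := by rw [hc] at hdrop; simpa using hdrop
      subst hl0
      rw [hc] at hpre
      have hc' : c = ':' := by
        cases pre with
        | nil => simpa using hpre.symm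
        | cons a l2 =>
          have := congrArg List.length hpre
          simp at this
      simp [hc, hc']
  have := congrArg String.ofList htl
  simpa using this

theorem pvGRest_span (ts : List String) : ∀ cs : String, ":" ∉ ts →
    pvGRest cs ts =
      String.join ((ts.takeWhile (fun x => ¬ pvIsHeader x)).map pvRenderItem) ++
      ((if cs ≠ "" then "</div>\n" else "") ++ pvRenderSections (ts.dropWhile (fun x => ¬ pvIsHeader x))) := by
  induction ts with
  | nil => intro cs _; simp [pvGRest, pvRenderSections, String.join, String.empty_append]
  | cons t ts ih =>
    intro cs hmem
    have hmem' : ":" ∉ ts := fun hx => hmem (List.mem_cons_of_mem _ hx)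
    have htne : t ≠ ":" := fun hx => hmem (by rw [hx]; exact List.mem_cons_self)
    by_cases h : pvIsHeader t
    · rw [pvGRest, if_pos h]
      rw [List.takeWhile_cons, List.dropWhile_cons]
      simp only [h, not_true, decide_false, Bool.false_eq_true, if_false]
      rw [pvRenderSections, ih _ hmem']
      have hcur : PySem.Str.slice t none (some (-1)) ≠ "" := pvHeaderName_ne t h htne
      simp [hcur, String.join, String.empty_append, String.append_assoc]
    · rw [pvGRest, if_neg h]
      rw [List.takeWhile_cons, List.dropWhile_cons]
      simp only [h, not_false_iff, decide_true, if_true, Bool.false_eq_true]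
      rw [List.map_cons, pvJoinCons, ih _ hmem']
      simp [String.append_assoc]

-- length comparison: A's tail rendering is never longer than B's, and strictly shorter
-- when a bare ":" token remains
def pvBRest (cs : String) (ts : List String) : String :=
  String.join ((ts.takeWhile (fun x => ¬ pvIsHeader x)).map pvRenderItem) ++
    ((if cs ≠ "" then "</div>\n" else "") ++ pvRenderSections (ts.dropWhile (fun x => ¬ pvIsHeader x)))

theorem pvLenLe (ts : List String) : ∀ cs : String,
    (pvGRest cs ts).length ≤ (pvBRest cs ts).length := by
  induction ts with
  | nil =>
    intro cs
    simp only [pvGRest, pvBRest, List.takeWhile_nil, List.dropWhile_nil, List.map_nil,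
      pvRenderSections, String.join]
    split_ifs <;> simp
  | cons t ts ih =>
    intro cs
    by_cases h : pvIsHeader t
    · have hhdr : pvIsHeader t = true := h
      rw [pvGRest, if_pos h]
      unfold pvBRest
      rw [List.takeWhile_cons, List.dropWhile_cons]
      simp only [hhdr, not_true, decide_false, Bool.false_eq_true, if_false]
      rw [pvRenderSections]
      have hle := ih (PySem.Str.slice t none (some (-1)))
      unfold pvBRest at hle
      simp only [String.length_append, String.join, List.map_nil, List.foldl_nil] at *
      split_ifs at * <;> simp_all <;> omega
    · rw [pvGRest, if_neg h]
      unfold pvBRest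
      rw [List.takeWhile_cons, List.dropWhile_cons]
      simp only [h, not_false_iff, decide_true, if_true, Bool.false_eq_true]
      rw [List.map_cons, pvJoinCons]
      have hle := ih cs
      unfold pvBRest at hle
      simp only [String.length_append] at *
      omega

theorem pvLenLt (ts : List String) : ∀ cs : String, ":" ∈ ts →
    (pvGRest cs ts).length < (pvBRest cs ts).length := by
  induction ts with
  | nil => intro cs h; simp at h
  | cons t ts ih =>
    intro cs hmem
    by_cases h : pvIsHeader t
    · rw [pvGRest, if_pos h]
      unfold pvBRest
      rw [List.takeWhile_cons, List.dropWhile_cons]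
      simp only [h, not_true, decide_false, Bool.false_eq_true, if_false]
      rw [pvRenderSections]
      by_cases ht : t = ":"
      · -- bare colon: cur = "", B emits an extra close
        have hcur : PySem.Str.slice t none (some (-1)) = "" := by subst ht; decide
        have hle := pvLenLe ts (PySem.Str.slice t none (some (-1)))
        unfold pvBRest at hle
        rw [hcur] at *
        have hg : ("</div>\n" : String).length = 7 := by decide
        simp only [String.length_append, ne_eq, not_true, String.join] at *
        simp_all [String.length_append]
        omega
      · have hmem' : ":" ∈ ts := by
          rcases List.mem_cons.mp hmem with h1 | h1
          · exact absurd h1.symm ht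
          · exact h1
        have hlt := ih (PySem.Str.slice t none (some (-1))) hmem'
        have hcur : PySem.Str.slice t none (some (-1)) ≠ "" := pvHeaderName_ne t h ht
        unfold pvBRest at hlt
        simp only [String.length_append] at *
        split_ifs at * <;> simp_all <;> omega
    · have hmem' : ":" ∈ ts := by
        rcases List.mem_cons.mp hmem with h1 | h1
        · exfalso; apply h; rw [← h1]; decide
        · exact h1
      rw [pvGRest, if_neg h]
      unfold pvBRest
      rw [List.takeWhile_cons, List.dropWhile_cons]
      simp only [h, not_false_iff, decide_true, if_true, Bool.false_eq_true]
      rw [List.map_cons, pvJoinCons]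
      have hlt := ih cs hmem'
      unfold pvBRest at hlt
      simp only [String.length_append] at *
      omega

-- ===== VERDICT (by name: the statement is the Claim_ definition above) =====
theorem format_infrastructure_details_spec : Claim_unchanged_format_infrastructure_details := by
  intro raw _ hnd
  unfold format_infrastructure_details format_infrastructure_details_alt
  rw [pvFoldA, pvGRest_span _ _ hnd]
  simp

theorem format_infrastructure_details_changed : Claim_changed_format_infrastructure_details := by
  unfold Claim_changed_format_infrastructure_details
  refine ⟨by decide, by decide, by decide, ?_, by decide⟩
  unfold format_infrastructure_details_alt pvDiffWitness_format_infrastructure_details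
  have hs : PySem.Str.split₀ "a :" = ["a", ":"] := by decide
  rw [hs]
  simp only []
  rw [show (List.takeWhile (fun x => decide (¬pvIsHeader x = true)) ["a", ":"]) = ["a"] from by decide,
      show (List.dropWhile (fun x => decide (¬pvIsHeader x = true)) ["a", ":"]) = [":"] from by decide]
  rw [pvRenderSections]
  rw [show (List.takeWhile (fun x => decide (¬pvIsHeader x = true)) ([] : List String)) = [] from rfl,
      show (List.dropWhile (fun x => decide (¬pvIsHeader x = true)) ([] : List String)) = [] from rfl]
  rw [pvRenderSections]
  decide

theorem format_infrastructure_details_tight : Claim_exact_format_infrastructure_details := by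
  intro raw _ hd heq
  have h1 : format_infrastructure_details raw = pvGRest "" (PySem.Str.split₀ raw) := by
    unfold format_infrastructure_details
    rw [pvFoldA]
    simp
  have h2 : format_infrastructure_details_alt raw = pvBRest "" (PySem.Str.split₀ raw) := by
    unfold format_infrastructure_details_alt pvBRest
    simp
  have hlt := pvLenLt (PySem.Str.split₀ raw) "" hd
  rw [h1, h2] at heq
  rw [heq] at hlt
  omega
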